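-- pv_equiv track=rewrite | github.com/liufeng112233/data-structure-and-algorithm | leetcode刷题/数组类/396_旋转函数.py | RotateFunction
-- ===== SOURCE A (Python) =====
-- def RotateFunction(nums, k):
--     stack = []
--     data = 0
--     l = len(nums)
--     kk = k % l
--     for i in range(l - kk, l):
--         stack.append(nums[i])
--     for j in range(0, l - kk):
--         stack.append(nums[j])
--     for i in range(len(stack)):
--         data += i * stack[i]
--     return stack, data
-- ===== SOURCE B (Python) =====
-- def RotateFunction(nums, k):
--     l = len(nums)
--     kk = k % l
--     stack = nums[l - kk:] + nums[:l - kk]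
--     S = sum(nums)
--     F = sum(i * v for i, v in enumerate(nums))
--     for step in range(kk):
--         F += S - l * nums[l - 1 - step]
--     return stack, F
-- ===== Notes on version B (the rewrite author's own statement) =====
-- stated objective: alternative
-- what changed: B builds the rotated list by slicing instead of two index loops, and computes the weighted index sum via the rotate-function recurrence F += S - l*nums[l-1-step] applied kk times instead of a final pass summing i*stack[i].
import Mathlib
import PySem

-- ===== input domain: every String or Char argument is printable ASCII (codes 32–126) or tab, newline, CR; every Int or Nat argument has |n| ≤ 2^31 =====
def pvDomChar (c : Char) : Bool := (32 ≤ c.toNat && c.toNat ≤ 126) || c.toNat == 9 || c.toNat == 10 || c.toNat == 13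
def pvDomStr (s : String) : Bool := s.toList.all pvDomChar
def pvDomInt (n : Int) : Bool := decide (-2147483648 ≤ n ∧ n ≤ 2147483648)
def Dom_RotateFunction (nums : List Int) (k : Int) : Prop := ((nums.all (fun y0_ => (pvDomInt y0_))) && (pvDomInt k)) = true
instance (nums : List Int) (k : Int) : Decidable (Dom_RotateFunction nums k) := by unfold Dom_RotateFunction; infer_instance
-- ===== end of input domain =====

-- B replaces the weighted-sum pass over the rotated list by the rotate-function recurrence and builds the rotation by slicing (alternative decomposition, same cost).

-- ===== PORT A =====
def RotateFunction (nums : List Int) (k : Int) : List Int × Int :=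
  let l : Int := PySem.List.len nums
  let kk : Int := PySem.Int.mod k l
  let stack1 : List Int :=
    (PySem.List.pyRange (l - kk) l).foldl (fun st i => st ++ [PySem.List.pyGetD nums i 0]) []
  let stack : List Int :=
    (PySem.List.pyRange 0 (l - kk)).foldl (fun st j => st ++ [PySem.List.pyGetD nums j 0]) stack1
  let data : Int :=
    (PySem.List.pyRange 0 (PySem.List.len stack)).foldl
      (fun d i => d + i * PySem.List.pyGetD stack i 0) 0
  (stack, data)

-- ===== PORT B =====
def RotateFunction_alt (nums : List Int) (k : Int) : List Int × Int :=
  let l : Int := PySem.List.len nums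
  let kk : Int := PySem.Int.mod k l
  let stack : List Int :=
    PySem.List.slice nums (some (l - kk)) none ++ PySem.List.slice nums none (some (l - kk))
  let S : Int := nums.sum
  let F0 : Int := ((PySem.List.enumerate nums).map (fun p => p.1 * p.2)).sum
  let F : Int :=
    (PySem.List.pyRange 0 kk).foldl
      (fun F step => F + (S - l * PySem.List.pyGetD nums (l - 1 - step) 0)) F0
  (stack, F)

-- ===== PRECONDITION & SPEC =====
-- Pre_ excludes only the empty list, on which A raises ZeroDivisionError at 'k % len(nums)'.
def Pre_RotateFunction (nums : List Int) (k : Int) : Prop := nums ≠ []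
instance (nums : List Int) (k : Int) : Decidable (Pre_RotateFunction nums k) := by unfold Pre_RotateFunction; infer_instance
def pvWitness_RotateFunction : List Int × Int := ([1, 2, 3], 4)

def Spec_RotateFunction (nums : List Int) (k : Int) (out : List Int × Int) : Prop := out = RotateFunction_alt nums k
instance (nums : List Int) (k : Int) (out : List Int × Int) : Decidable (Spec_RotateFunction nums k out) := by unfold Spec_RotateFunction; infer_instance

-- ===== CLAIM (what is proved, stated in full; the proofs are below) =====
def Claim_equal_RotateFunction : Prop := ∀ (nums : List Int) (k : Int), Dom_RotateFunction nums k → Pre_RotateFunction nums k → Spec_RotateFunction nums k (RotateFunction nums k)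

-- ===== LEMMAS AND PROOFS =====

-- Σ i * xs[i], characterised structurally: the head has coefficient 0 and consing shifts all coefficients up by one.
def wsum : List Int → Int
  | [] => 0
  | _ :: xs => wsum xs + xs.sum

theorem getD_range_id (xs : List Int) :
    (List.range xs.length).map (fun i => xs.getD i 0) = xs := by
  have h := PySem.List.map_pyGetD_pyRange_zero xs 0
  rw [show PySem.List.len xs = ((xs.length : Nat) : Int) from rfl,
    PySem.List.pyRange_zero_natCast, List.map_map] at h
  simpa [Function.comp_def, PySem.List.pyGetD_natCast, List.getD_eq_getElem?_getD] using h

theorem wsum_range (xs : List Int) :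
    ((List.range xs.length).map (fun i : Nat => (i : Int) * xs.getD i 0)).sum = wsum xs := by
  induction xs with
  | nil => simp [wsum]
  | cons x xs ih =>
    rw [List.length_cons, List.range_succ_eq_map, List.map_cons, List.map_map]
    have hfun : ((fun i : Nat => (i : Int) * (x :: xs).getD i 0) ∘ Nat.succ)
        = fun i : Nat => (i : Int) * xs.getD i 0 + xs.getD i 0 := by
      funext i
      simp [Function.comp]
      ring
    rw [hfun, List.sum_cons, PySem.List.sum_map_add_int, ih]
    have h2 : ((List.range xs.length).map (fun i => xs.getD i 0)).sum = xs.sum := by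
      rw [getD_range_id]
    rw [h2, wsum]
    simp

theorem wsum_append_singleton (ys : List Int) (y : Int) :
    wsum (ys ++ [y]) = wsum ys + (ys.length : Int) * y := by
  induction ys with
  | nil => simp [wsum]
  | cons z zs ih =>
    simp only [List.cons_append, wsum, ih, List.sum_append, List.length_cons, List.sum_cons,
      List.sum_nil]
    push_cast
    ring

theorem wsum_enumerate (xs : List Int) :
    ∀ s : Int, ((PySem.List.enumerate xs s).map (fun p => p.1 * p.2)).sum = wsum xs + s * xs.sum := by
  induction xs with
  | nil => intro s; simp [PySem.List.enumerate, wsum]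
  | cons x xs ih =>
    intro s
    simp only [PySem.List.enumerate, List.map_cons, List.sum_cons, ih (s + 1), wsum, List.sum_cons]
    ring

-- the two index loops of A read exactly a contiguous segment of nums
theorem seg (xs : List Int) (a : Nat) :
    ∀ b : Nat, a ≤ b → b ≤ xs.length →
      (PySem.List.pyRange (a : Int) (b : Int)).map (fun i => PySem.List.pyGetD xs i 0)
        = (xs.drop a).take (b - a) := by
  intro b
  induction b with
  | zero =>
    intro h1 _
    have ha : a = 0 := by omega
    subst ha
    simp
  | succ b ih =>
    intro h1 h2
    by_cases hab : a = b + 1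
    · subst hab
      simp
    · have h1' : a ≤ b := by omega
      have hb : b < xs.length := by omega
      rw [show ((b + 1 : Nat) : Int) = (b : Int) + 1 by push_cast; ring,
        PySem.List.pyRange_one_succ_right (by exact_mod_cast h1'), List.map_append,
        ih h1' (by omega), List.map_cons, List.map_nil, PySem.List.pyGetD_natCast]
      have hlt : b - a < (xs.drop a).length := by
        rw [List.length_drop]; omega
      have htk : (xs.drop a).take (b + 1 - a) = (xs.drop a).take (b - a) ++ [(xs.drop a)[b - a]] := by
        rw [show b + 1 - a = (b - a) + 1 by omega, List.take_succ_eq_append_getElem hlt]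
      rw [htk]
      have hg : (xs.drop a)[b - a] = xs.getD b 0 := by
        rw [List.getElem_drop, List.getD_eq_getElem xs 0 (by omega)]
        congr 1
        omega
      rw [hg]

-- B's recurrence loop computes the weighted sum of the rotated list
theorem loopF (nums : List Int) :
    ∀ t : Nat, t ≤ nums.length →
      (PySem.List.pyRange 0 (t : Int)).foldl
          (fun F step => F + (nums.sum - (nums.length : Int) *
            PySem.List.pyGetD nums ((nums.length : Int) - 1 - step) 0)) (wsum nums)
        = wsum (nums.drop (nums.length - t) ++ nums.take (nums.length - t)) := by
  intro t
  induction t with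
  | zero =>
    intro _
    simp [List.drop_length, List.take_length]
  | succ t ih =>
    intro h
    rw [show ((t + 1 : Nat) : Int) = (t : Int) + 1 by push_cast; ring,
      PySem.List.pyRange_one_succ_right (by positivity), List.foldl_append, ih (by omega)]
    simp only [List.foldl_cons, List.foldl_nil]
    have hidx : (nums.length : Int) - 1 - (t : Int) = ((nums.length - 1 - t : Nat) : Int) := by
      omega
    rw [hidx, PySem.List.pyGetD_natCast]
    set n := nums.length with hn
    set m := n - 1 - t with hm
    have hmn : m < n := by omega
    have h1 : n - t = m + 1 := by omega
    have h2 : n - (t + 1) = m := by omega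
    rw [h1, h2]
    have hy : nums.getD m 0 = nums[m] := List.getD_eq_getElem nums 0 hmn
    have htk : nums.take (m + 1) = nums.take m ++ [nums[m]] :=
      List.take_succ_eq_append_getElem hmn
    have hdr : nums.drop m = nums[m] :: nums.drop (m + 1) :=
      List.drop_eq_getElem_cons hmn
    rw [hy, htk, hdr]
    rw [show nums.drop (m + 1) ++ (nums.take m ++ [nums[m]])
        = (nums.drop (m + 1) ++ nums.take m) ++ [nums[m]] by rw [List.append_assoc]]
    rw [wsum_append_singleton]
    show _ = wsum (nums[m] :: (nums.drop (m + 1) ++ nums.take m))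
    rw [wsum]
    have hS : nums.sum = (nums.take m).sum + nums[m] + (nums.drop (m + 1)).sum := by
      have := List.sum_take_add_sum_drop nums (m + 1)
      rw [htk, List.sum_append] at this
      simp at this
      omega
    have hlen : ((nums.drop (m + 1) ++ nums.take m).length : Int) = (n : Int) - 1 := by
      rw [List.length_append, List.length_drop, List.length_take]
      omega
    rw [hlen, hS, List.sum_append]
    ring

-- ===== VERDICT (by name: the statement is the Claim_ definition above) =====
theorem RotateFunction_spec : Claim_equal_RotateFunction := by
  intro nums k _ hpre
  unfold Spec_RotateFunction
  have hn : 0 < nums.length := List.length_pos_iff.mpr hpre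
  have hl : (0 : Int) < (nums.length : Int) := by exact_mod_cast hn
  have hlen : PySem.List.len nums = ((nums.length : Nat) : Int) := rfl
  have hk0 : 0 ≤ PySem.Int.mod k (nums.length : Int) := PySem.Int.mod_nonneg k hl
  have hk1 : PySem.Int.mod k (nums.length : Int) < (nums.length : Int) := PySem.Int.mod_lt k hl
  set t : Nat := (PySem.Int.mod k (nums.length : Int)).toNat with htdef
  have hkt : PySem.Int.mod k (nums.length : Int) = (t : Int) := by
    rw [htdef, Int.toNat_of_nonneg hk0]
  have ht : t < nums.length := by omega
  have hsub : (nums.length : Int) - PySem.Int.mod k (nums.length : Int)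
      = ((nums.length - t : Nat) : Int) := by omega
  -- the rotated list both sides build
  set st : List Int := nums.drop (nums.length - t) ++ nums.take (nums.length - t) with hst
  have hstlen : st.length = nums.length := by
    rw [hst, List.length_append, List.length_drop, List.length_take]
    omega
  have hA : RotateFunction nums k = (st, wsum st) := by
    unfold RotateFunction
    simp only [hlen, PySem.List.foldl_append_singleton_eq_map, List.nil_append]
    rw [hsub, seg nums (nums.length - t) nums.length (by omega) (by omega),
      show PySem.List.pyRange 0 ((nums.length - t : Nat) : Int)
        = PySem.List.pyRange ((0 : Nat) : Int) ((nums.length - t : Nat) : Int) by norm_num,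
      seg nums 0 (nums.length - t) (by omega) (by omega)]
    have hseg1 : (nums.drop (nums.length - t)).take (nums.length - (nums.length - t))
        = nums.drop (nums.length - t) := by
      apply List.take_of_length_le
      rw [List.length_drop]
    have hseg2 : (nums.drop 0).take (nums.length - t - 0) = nums.take (nums.length - t) := by
      simp
    rw [hseg1, hseg2, ← hst]
    have hdata : (PySem.List.pyRange 0 (PySem.List.len st)).foldl
        (fun d i => d + i * PySem.List.pyGetD st i 0) 0 = wsum st := by
      rw [show PySem.List.len st = ((st.length : Nat) : Int) from rfl,
        PySem.List.pyRange_zero_natCast]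
      rw [List.foldl_map, show (fun (acc : Int) (k : Nat) => acc + (k : Int) * PySem.List.pyGetD st (k : Int) 0)
          = fun acc k => acc + ((fun j : Nat => (j : Int) * st.getD j 0) k) by
            funext acc j; rw [PySem.List.pyGetD_natCast]]
      rw [PySem.List.foldl_add, wsum_range]
      ring
    rw [hdata]
  have hB : RotateFunction_alt nums k = (st, wsum st) := by
    unfold RotateFunction_alt
    simp only [hlen]
    rw [hsub, PySem.List.slice_from_natCast, PySem.List.slice_to_natCast, ← hst]
    have hF0 : ((PySem.List.enumerate nums).map (fun p => p.1 * p.2)).sum = wsum nums := by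
      rw [wsum_enumerate nums 0]
      ring
    rw [hF0, hkt, loopF nums t (by omega), ← hst]
  rw [hA, hB]
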